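-- pv_equiv track=rewrite | github.com/bitcoinaustria/kassiber | kassiber/core/ui_snapshot.py | _workspace_jurisdiction
-- ===== SOURCE A (Python) =====
-- def _workspace_jurisdiction(tax_countries: list[str]) -> str:
--     normalized = {country.strip().lower() for country in tax_countries if country}
--     if not normalized:
--         return "Generic"
--     if normalized == {"at"}:
--         return "Austria"
--     if len(normalized) == 1:
--         return next(iter(normalized)).upper()
--     return "Mixed"
-- ===== SOURCE B (Python) =====
-- def _workspace_jurisdiction(tax_countries: list[str]) -> str:
--     # Fold over the final label space, right to left: combine each entry's own
--     # jurisdiction label with the label already computed for the entries after it.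
--     label = "Generic"
--     for head in reversed(tax_countries):
--         if head:
--             n = head.strip().lower()
--             mine = "Austria" if n == "at" else n.upper()
--             label = mine if label in ("Generic", mine) else "Mixed"
--     return label
-- ===== Notes on version B (the rewrite author's own statement) =====
-- stated objective: alternative
-- what changed: Instead of building a set of normalized codes and branching on its shape, B folds over the answer space itself: each entry is mapped to its own final label (Austria/upper-case code) and combined right-to-left with the label of the suffix, Generic being the unit and any disagreement collapsing to Mixed.
import Mathlib
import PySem

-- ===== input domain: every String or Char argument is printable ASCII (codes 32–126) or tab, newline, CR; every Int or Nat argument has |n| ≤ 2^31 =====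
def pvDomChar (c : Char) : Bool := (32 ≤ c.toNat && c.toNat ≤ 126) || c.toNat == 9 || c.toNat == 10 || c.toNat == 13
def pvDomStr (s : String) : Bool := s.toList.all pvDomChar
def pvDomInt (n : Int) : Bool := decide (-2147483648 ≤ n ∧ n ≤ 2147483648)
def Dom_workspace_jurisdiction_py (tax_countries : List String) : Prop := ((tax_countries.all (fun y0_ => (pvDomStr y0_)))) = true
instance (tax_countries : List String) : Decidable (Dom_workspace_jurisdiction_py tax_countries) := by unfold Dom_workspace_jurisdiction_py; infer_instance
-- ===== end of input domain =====

-- B replaces A's set-of-normalized-codes and its four set-shaped branches by a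
-- right-to-left fold over the label space itself (objective: alternative, same cost).


-- ===== PORT A =====
def workspace_jurisdiction_py (tax_countries : List String) : String :=
  -- normalized = {country.strip().lower() for country in tax_countries if country}
  let normalized : PySem.Set String :=
    PySem.Set.ofList ((tax_countries.filter (fun country => country ≠ "")).map
      (fun country => PySem.Str.lower (PySem.Str.strip country)))
  if normalized = [] then "Generic"
  else if PySem.Set.equal normalized (PySem.Set.ofList ["at"]) then "Austria"
  -- next(iter(normalized)) read under len == 1, where set-iteration order is irrelevant
  else if PySem.Set.len normalized = 1 then PySem.Str.upper (normalized.headD "")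
  else "Mixed"

-- ===== PORT B =====
-- B's loop body: combine one entry's own label with the label of the entries after it
def wjCombine (label : String) (head : String) : String :=
  if head = "" then label
  else
    let n := PySem.Str.lower (PySem.Str.strip head)
    let mine := if n = "at" then "Austria" else PySem.Str.upper n
    if label = "Generic" ∨ label = mine then mine else "Mixed"

def workspace_jurisdiction_py_alt (tax_countries : List String) : String :=
  tax_countries.reverse.foldl wjCombine "Generic"

-- ===== PRECONDITION & SPEC =====
def Spec_workspace_jurisdiction_py (tax_countries : List String) (out : String) : Prop := out = workspace_jurisdiction_py_alt tax_countries
instance (tax_countries : List String) (out : String) : Decidable (Spec_workspace_jurisdiction_py tax_countries out) := by unfold Spec_workspace_jurisdiction_py; infer_instance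

-- ===== CLAIM (what is proved, stated in full; the proofs are below) =====
def Claim_equal_workspace_jurisdiction_py : Prop := ∀ (tax_countries : List String), Dom_workspace_jurisdiction_py tax_countries → Spec_workspace_jurisdiction_py tax_countries (workspace_jurisdiction_py tax_countries)

-- ===== LEMMAS AND PROOFS =====

-- the per-entry label and the common reference semantics over the normalized list
def wjMine (n : String) : String :=
  if n = "at" then "Austria" else PySem.Str.upper n

def wjLab : List String → String
  | [] => "Generic"
  | n :: rest => if rest.all (fun m => m == n) then wjMine n else "Mixed"

-- strings produced by .lower() contain no upper-case ASCII letters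
def wjGood (n : String) : Prop := ∀ ch ∈ n.toList, PySem.Chars.isupper ch = false

theorem wj_char_le (a b : Char) : (a ≤ b) ↔ a.toNat ≤ b.toNat := by
  rw [Char.le_def, UInt32.le_iff_toNat_le]; rfl

theorem wj_isupper_iff (c : Char) :
    PySem.Chars.isupper c = true ↔ 65 ≤ c.toNat ∧ c.toNat ≤ 90 := by
  have hA : ('A' : Char).toNat = 65 := by decide
  have hZ : ('Z' : Char).toNat = 90 := by decide
  simp [PySem.Chars.isupper, wj_char_le, hA, hZ]

theorem wj_islower_iff (c : Char) :
    PySem.Chars.islower c = true ↔ 97 ≤ c.toNat ∧ c.toNat ≤ 122 := by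
  have ha : ('a' : Char).toNat = 97 := by decide
  have hz : ('z' : Char).toNat = 122 := by decide
  simp [PySem.Chars.islower, wj_char_le, ha, hz]

theorem wj_toNat_ofNat_valid (n : Nat) (h : n < 55296) : (Char.ofNat n).toNat = n := by
  rw [Char.toNat_ofNat]
  simp [Nat.isValidChar, Or.inl h]

theorem wj_isupper_lowerChar (c : Char) : PySem.Chars.isupper (PySem.Chars.lowerChar c) = false := by
  unfold PySem.Chars.lowerChar
  by_cases h : PySem.Chars.isupper c = true
  · rw [if_pos h]
    obtain ⟨h1, h2⟩ := (wj_isupper_iff c).mp h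
    have ht : (Char.ofNat (c.toNat + 32)).toNat = c.toNat + 32 :=
      wj_toNat_ofNat_valid _ (by omega)
    cases hb : PySem.Chars.isupper (Char.ofNat (c.toNat + 32)) with
    | false => rfl
    | true =>
      obtain ⟨b1, b2⟩ := (wj_isupper_iff _).mp hb
      rw [ht] at b1 b2; omega
  · rw [if_neg h]
    cases hb : PySem.Chars.isupper c with
    | false => rfl
    | true => exact absurd hb h

theorem wj_islower_upperChar (c : Char) : PySem.Chars.islower (PySem.Chars.upperChar c) = false := by
  unfold PySem.Chars.upperChar
  by_cases h : PySem.Chars.islower c = true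
  · rw [if_pos h]
    obtain ⟨h1, h2⟩ := (wj_islower_iff c).mp h
    have ht : (Char.ofNat (c.toNat - 32)).toNat = c.toNat - 32 :=
      wj_toNat_ofNat_valid _ (by omega)
    cases hb : PySem.Chars.islower (Char.ofNat (c.toNat - 32)) with
    | false => rfl
    | true =>
      obtain ⟨b1, b2⟩ := (wj_islower_iff _).mp hb
      rw [ht] at b1 b2; omega
  · rw [if_neg h]
    cases hb : PySem.Chars.islower c with
    | false => rfl
    | true => exact absurd hb h

theorem wj_toNat_inj (a b : Char) (hab : a.toNat = b.toNat) : a = b :=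
  Char.ext (UInt32.toNat_inj.mp hab)

theorem wj_upperChar_inj (c₁ c₂ : Char)
    (h₁ : PySem.Chars.isupper c₁ = false) (h₂ : PySem.Chars.isupper c₂ = false)
    (h : PySem.Chars.upperChar c₁ = PySem.Chars.upperChar c₂) : c₁ = c₂ := by
  have h₁' : ¬ (65 ≤ c₁.toNat ∧ c₁.toNat ≤ 90) := fun hh => by
    rw [(wj_isupper_iff c₁).mpr hh] at h₁; exact absurd h₁ (by decide)
  have h₂' : ¬ (65 ≤ c₂.toNat ∧ c₂.toNat ≤ 90) := fun hh => by
    rw [(wj_isupper_iff c₂).mpr hh] at h₂; exact absurd h₂ (by decide)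
  unfold PySem.Chars.upperChar at h
  by_cases l₁ : PySem.Chars.islower c₁ = true <;>
    by_cases l₂ : PySem.Chars.islower c₂ = true
  · obtain ⟨a1, a2⟩ := (wj_islower_iff c₁).mp l₁
    obtain ⟨b1, b2⟩ := (wj_islower_iff c₂).mp l₂
    rw [if_pos l₁, if_pos l₂] at h
    have e := congrArg Char.toNat h
    rw [wj_toNat_ofNat_valid _ (by omega), wj_toNat_ofNat_valid _ (by omega)] at e
    exact wj_toNat_inj _ _ (by omega)
  · obtain ⟨a1, a2⟩ := (wj_islower_iff c₁).mp l₁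
    rw [if_pos l₁, if_neg l₂] at h
    have e := congrArg Char.toNat h
    rw [wj_toNat_ofNat_valid _ (by omega)] at e
    exact absurd ⟨by omega, by omega⟩ h₂'
  · obtain ⟨b1, b2⟩ := (wj_islower_iff c₂).mp l₂
    rw [if_neg l₁, if_pos l₂] at h
    have e := congrArg Char.toNat h
    rw [wj_toNat_ofNat_valid _ (by omega)] at e
    exact absurd ⟨by omega, by omega⟩ h₁'
  · rw [if_neg l₁, if_neg l₂] at h
    exact h

theorem wj_good_lower (s : String) : wjGood (PySem.Str.lower s) := by
  intro ch hch
  rw [PySem.Str.toList_lower] at hch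
  simp only [PySem.Chars.lower, List.mem_map] at hch
  obtain ⟨c, _, rfl⟩ := hch
  exact wj_isupper_lowerChar c

theorem wj_upper_no_lower (n : String) (ch : Char) (hch : ch ∈ (PySem.Str.upper n).toList) :
    PySem.Chars.islower ch = false := by
  rw [PySem.Str.toList_upper] at hch
  simp only [PySem.Chars.upper, List.mem_map] at hch
  obtain ⟨c, _, rfl⟩ := hch
  exact wj_islower_upperChar c

theorem wj_map_upper_inj (l₁ : List Char) (l₂ : List Char)
    (h₁ : ∀ c ∈ l₁, PySem.Chars.isupper c = false)
    (h₂ : ∀ c ∈ l₂, PySem.Chars.isupper c = false)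
    (h : l₁.map PySem.Chars.upperChar = l₂.map PySem.Chars.upperChar) : l₁ = l₂ := by
  induction l₁ generalizing l₂ with
  | nil => cases l₂ <;> simp_all
  | cons c cs ih =>
    cases l₂ with
    | nil => simp at h
    | cons d ds =>
      simp only [List.map_cons, List.cons.injEq] at h
      have hcd : c = d :=
        wj_upperChar_inj c d (h₁ c (by simp)) (h₂ d (by simp)) h.1
      have tail : cs = ds :=
        ih ds (fun x hx => h₁ x (by simp [hx])) (fun x hx => h₂ x (by simp [hx])) h.2
      simp [hcd, tail]

theorem wj_upper_inj (n m : String) (hn : wjGood n) (hm : wjGood m)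
    (h : PySem.Str.upper n = PySem.Str.upper m) : n = m := by
  apply String.toList_inj.mp
  have h' : PySem.Chars.upper n.toList = PySem.Chars.upper m.toList := by
    have := congrArg String.toList h
    rwa [PySem.Str.toList_upper, PySem.Str.toList_upper] at this
  exact wj_map_upper_inj n.toList m.toList hn hm h'

theorem wj_mine_ne_Generic (n : String) (hn : wjGood n) : wjMine n ≠ "Generic" := by
  unfold wjMine
  split
  · decide
  · intro h
    have : ('e' : Char) ∈ (PySem.Str.upper n).toList := by
      rw [h]; decide
    exact absurd (wj_upper_no_lower n 'e' this) (by decide)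

theorem wj_mine_ne_Mixed (n : String) (hn : wjGood n) : wjMine n ≠ "Mixed" := by
  unfold wjMine
  split
  · decide
  · intro h
    have : ('i' : Char) ∈ (PySem.Str.upper n).toList := by
      rw [h]; decide
    exact absurd (wj_upper_no_lower n 'i' this) (by decide)

theorem wj_mine_inj (n m : String) (hn : wjGood n) (hm : wjGood m)
    (h : wjMine n = wjMine m) : n = m := by
  unfold wjMine at h
  split at h <;> split at h
  · simp_all
  · exfalso
    have : ('u' : Char) ∈ (PySem.Str.upper m).toList := by rw [← h]; decide
    exact absurd (wj_upper_no_lower m 'u' this) (by decide)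
  · exfalso
    have : ('u' : Char) ∈ (PySem.Str.upper n).toList := by rw [h]; decide
    exact absurd (wj_upper_no_lower n 'u' this) (by decide)
  · exact wj_upper_inj n m hn hm h

-- B's fold over the reversed input is wjLab of the normalized list
theorem wj_foldr_filter_map (tax : List String) :
    tax.foldr (fun x y => wjCombine y x) "Generic" =
      ((tax.filter (fun c => c ≠ "")).map
        (fun c => PySem.Str.lower (PySem.Str.strip c))).foldr
        (fun n label => if label = "Generic" ∨ label = wjMine n then wjMine n else "Mixed")
        "Generic" := by
  induction tax with
  | nil => rfl
  | cons c rest ih =>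
    show wjCombine (rest.foldr (fun x y => wjCombine y x) "Generic") c = _
    rw [ih]
    by_cases hc : c = "" <;>
      simp [List.filter_cons, hc, wjCombine, wjMine]

theorem wj_foldr_lab (ns : List String) (hg : ∀ n ∈ ns, wjGood n) :
    ns.foldr (fun n label => if label = "Generic" ∨ label = wjMine n then wjMine n else "Mixed")
      "Generic" = wjLab ns := by
  induction ns with
  | nil => rfl
  | cons n rest ih =>
    have hgn : wjGood n := hg n (by simp)
    have hgr : ∀ m ∈ rest, wjGood m := fun m hm => hg m (by simp [hm])
    simp only [List.foldr_cons, ih hgr]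
    cases rest with
    | nil => simp [wjLab]
    | cons m r =>
      have hgm : wjGood m := hgr m (by simp)
      by_cases hall : (r.all (fun x => x == m)) = true
      · -- uniform tail: its label is wjMine m
        have hlab : wjLab (m :: r) = wjMine m := by simp [wjLab, hall]
        rw [hlab]
        by_cases hnm : n = m
        · have hall2 : ((m :: r).all fun x => x == n) = true := by
            rw [hnm]; simpa using hall
          have hl2 : wjLab (n :: m :: r) = wjMine n := by simp [wjLab, hall2]
          rw [hl2, hnm]
          simp
        · have hcond : ¬ (wjMine m = "Generic" ∨ wjMine m = wjMine n) := by
            rintro (h | h)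
            · exact wj_mine_ne_Generic m hgm h
            · exact hnm (wj_mine_inj n m hgn hgm h.symm)
          rw [if_neg hcond]
          have hall2 : ((m :: r).all fun x => x == n) = false := by
            simp only [List.all_cons, Bool.and_eq_false_iff]
            exact Or.inl (beq_eq_false_iff_ne.mpr (Ne.symm hnm))
          have hl2 : wjLab (n :: m :: r) = "Mixed" := by simp [wjLab, hall2]
          rw [hl2]
      · -- mixed tail
        have hlab : wjLab (m :: r) = "Mixed" := by simp [wjLab, hall]
        rw [hlab]
        have hcond : ¬ (("Mixed" : String) = "Generic" ∨ ("Mixed" : String) = wjMine n) := by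
          rintro (h | h)
          · exact absurd h (by decide)
          · exact (wj_mine_ne_Mixed n hgn) h.symm
        rw [if_neg hcond]
        have hall2 : ((m :: r).all fun x => x == n) = false := by
          by_contra hco
          have hco' : ((m :: r).all fun x => x == n) = true := by
            revert hco; cases ((m :: r).all fun x => x == n) <;> simp
          simp only [List.all_cons, Bool.and_eq_true, beq_iff_eq] at hco'
          obtain ⟨hmn, hr⟩ := hco'
          apply hall
          rw [List.all_eq_true]
          intro x hx
          have hxn : x = n := by simpa using (List.all_eq_true).mp hr x hx
          simp only [beq_iff_eq]
          exact hxn.trans hmn.symm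
        have hl2 : wjLab (n :: m :: r) = "Mixed" := by simp [wjLab, hall2]
        rw [hl2]

-- foldl of Set.add only appends
theorem wj_foldl_add_append {s : List String} (rest : List String) :
    ∃ t, rest.foldl PySem.Set.add s = s ++ t := by
  induction rest generalizing s with
  | nil => exact ⟨[], by simp⟩
  | cons a rest ih =>
    simp only [List.foldl_cons, PySem.Set.add]
    by_cases h : a ∈ s
    · simpa [PySem.Set.contains, h] using ih (s := s)
    · obtain ⟨t, ht⟩ := ih (s := s ++ [a])
      exact ⟨a :: t, by simpa [PySem.Set.contains, h] using ht⟩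

theorem wj_foldl_add_const (n : String) (rest : List String)
    (h : ∀ m ∈ rest, m = n) : rest.foldl PySem.Set.add [n] = [n] := by
  induction rest with
  | nil => rfl
  | cons a rest ih =>
    have ha : a = n := h a (by simp)
    simp only [List.foldl_cons, ha, PySem.Set.add, PySem.Set.contains]
    simp [ih (fun m hm => h m (by simp [hm]))]

-- A is wjLab of the normalized list
theorem wj_A_lab (tax : List String) :
    workspace_jurisdiction_py tax =
      wjLab ((tax.filter (fun c => c ≠ "")).map
        (fun c => PySem.Str.lower (PySem.Str.strip c))) := by
  unfold workspace_jurisdiction_py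
  set ns := (tax.filter (fun c => c ≠ "")).map
    (fun c => PySem.Str.lower (PySem.Str.strip c)) with hns
  clear hns
  cases ns with
  | nil => rfl
  | cons n rest =>
    have hof : PySem.Set.ofList (n :: rest) = rest.foldl PySem.Set.add [n] := by
      simp [PySem.Set.ofList, PySem.Set.empty, PySem.Set.add, PySem.Set.contains]
    by_cases hall : (rest.all (fun x => x == n)) = true
    · -- uniform: A's set is exactly [n]
      have hallp : ∀ m ∈ rest, m = n := by
        intro m hm
        have := (List.all_eq_true).mp hall m hm
        simpa using this
      have hset : PySem.Set.ofList (n :: rest) = [n] := by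
        rw [hof, wj_foldl_add_const n rest hallp]
      rw [hset]
      have hlab : wjLab (n :: rest) = wjMine n := by simp [wjLab, hall]
      rw [hlab]
      by_cases hat : n = "at"
      · subst hat
        simp [wjMine, PySem.Set.equal, PySem.Set.issubset, PySem.Set.ofList,
          PySem.Set.empty, PySem.Set.add, PySem.Set.contains]
      · have : PySem.Set.equal [n] (PySem.Set.ofList ["at"]) = false := by
          simp [PySem.Set.equal, PySem.Set.issubset, PySem.Set.ofList,
            PySem.Set.empty, PySem.Set.add, PySem.Set.contains, hat]
        simp [this, hat, wjMine, PySem.Set.len]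
    · -- mixed: some m ∈ rest with m ≠ n; A's set has ≥ 2 distinct elements
      have hex : ∃ m ∈ rest, m ≠ n := by
        by_contra hco
        push_neg at hco
        exact absurd (List.all_eq_true.mpr (fun x hx => by simpa using hco x hx)) hall
      obtain ⟨m, hm, hmn'⟩ := hex
      obtain ⟨t, ht⟩ := wj_foldl_add_append (s := [n]) rest
      have hmem : m ∈ PySem.Set.ofList (n :: rest) :=
        (PySem.Set.mem_ofList _ _).mpr (by simp [hm])
      rw [hof, ht] at hmem ⊢
      have hne : (n :: t) ≠ [] := by simp
      have hneq : PySem.Set.equal (n :: t) (PySem.Set.ofList ["at"]) = false := by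
        by_contra h
        have heq : PySem.Set.equal (n :: t) (PySem.Set.ofList ["at"]) = true := by
          revert h; cases PySem.Set.equal (n :: t) (PySem.Set.ofList ["at"]) <;> simp
        have hsub := (Bool.and_eq_true _ _).mp heq |>.1
        simp only [PySem.Set.issubset, List.all_eq_true] at hsub
        have h1 : n = "at" := by
          have := hsub n (by simp)
          simpa [PySem.Set.contains, PySem.Set.ofList, PySem.Set.empty,
            PySem.Set.add, PySem.Set.contains] using this
        have h2 : m = "at" := by
          have := hsub m (by simpa using hmem)
          simpa [PySem.Set.contains, PySem.Set.ofList, PySem.Set.empty,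
            PySem.Set.add, PySem.Set.contains] using this
        exact hmn' (h2.trans h1.symm)
      have htne : t ≠ [] := by
        intro h
        subst h
        exact hmn' (by simpa using hmem)
      have hlab : wjLab (n :: rest) = "Mixed" := by simp [wjLab, hall]
      simp [hne, hneq, htne, hlab, PySem.Set.len]

-- ===== VERDICT (by name: the statement is the Claim_ definition above) =====
theorem workspace_jurisdiction_py_spec : Claim_equal_workspace_jurisdiction_py := by
  intro tax _
  show workspace_jurisdiction_py tax = workspace_jurisdiction_py_alt tax
  rw [wj_A_lab]
  unfold workspace_jurisdiction_py_alt
  rw [List.foldl_reverse, wj_foldr_filter_map, wj_foldr_lab]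
  intro n hn
  simp only [List.mem_map] at hn
  obtain ⟨c, _, rfl⟩ := hn
  exact wj_good_lower _
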